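-- pv_equiv track=rewrite | github.com/feeeeex/Pythontutor | Занятие 3. Вычисления/Улитка.py | days_to_reach_top
-- ===== SOURCE A (Python) =====
-- def days_to_reach_top(h, a, b):
--     days = 0
--     current_height = 0
--     while current_height < h:
--         current_height += a
--         if current_height >= h:
--             break
--         current_height -= b
--         days += 1
--     return days
-- ===== SOURCE B (Python) =====
-- def days_to_reach_top(h, a, b):
--     # Closed form: 0 if the snail is out on day one (or the well has no depth),
--     # else the ceiling of (h - a) / (a - b) full day-night cycles.
--     if h <= a or h <= 0:
--         return 0
--     return -((a - h) // (a - b))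
-- ===== Notes on version B (the rewrite author's own statement) =====
-- stated objective: simpler
-- what changed: Replaced the day-by-day simulation loop with the closed form max(0, ceil((h-a)/(a-b))) computed by a single floor division.
-- outside the precondition, e.g. on days_to_reach_top(4, -1, -5): A returns 1, B returns 2
import Mathlib
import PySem

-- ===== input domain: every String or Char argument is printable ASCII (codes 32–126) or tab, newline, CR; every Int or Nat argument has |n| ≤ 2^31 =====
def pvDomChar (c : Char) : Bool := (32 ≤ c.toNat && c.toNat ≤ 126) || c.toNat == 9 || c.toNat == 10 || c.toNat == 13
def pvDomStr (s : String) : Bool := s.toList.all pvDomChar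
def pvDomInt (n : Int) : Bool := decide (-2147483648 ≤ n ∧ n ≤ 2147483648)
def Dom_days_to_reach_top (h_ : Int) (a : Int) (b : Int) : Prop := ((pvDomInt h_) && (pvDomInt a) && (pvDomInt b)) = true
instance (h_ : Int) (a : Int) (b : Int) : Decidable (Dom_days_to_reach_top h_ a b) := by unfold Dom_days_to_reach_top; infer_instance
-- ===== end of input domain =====

-- B replaces A's day-by-day simulation loop with the closed form max(0, ceil((h-a)/(a-b))) (simpler).

-- ===== PORT A =====
-- A's while loop, step for step; the `b < a` test in the recursive branch is a totality
-- guard only: on inputs where it fails the Python loop never terminates (outside Pre_).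
def daysLoopA (h_ : Int) (a : Int) (b : Int) (days cur : Int) : Int :=
  if cur < h_ then
    if cur + a ≥ h_ then days
    else if b < a then daysLoopA h_ a b (days + 1) (cur + a - b)
    else days
  else days
termination_by (h_ - cur).toNat
decreasing_by omega

def days_to_reach_top (h_ : Int) (a : Int) (b : Int) : Int :=
  daysLoopA h_ a b 0 0

-- ===== PORT B =====
def days_to_reach_top_alt (h_ : Int) (a : Int) (b : Int) : Int :=
  if h_ ≤ a ∨ h_ ≤ 0 then 0
  else -(PySem.Int.floordiv (a - h_) (a - b))

-- ===== PRECONDITION & SPEC =====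
-- Pre_ restricts to the snail problem's natural domain: it excludes inputs where A's loop
-- never terminates (a ≤ b with h_ > max 0 a), and inputs with a negative daily climb
-- a < 0 together with h_ > 0 and h_ > a — on the latter A still returns (when b < a),
-- but a negative climb is outside the task's meaning and A's value there depends on
-- which of its two exit checks happens to fire first.
def Pre_days_to_reach_top (h_ : Int) (a : Int) (b : Int) : Prop :=
  h_ ≤ 0 ∨ h_ ≤ a ∨ (b < a ∧ 0 ≤ a)
instance (h_ : Int) (a : Int) (b : Int) : Decidable (Pre_days_to_reach_top h_ a b) := by
  unfold Pre_days_to_reach_top; infer_instance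

def pvWitness_days_to_reach_top : Int × Int × Int := (10, 3, 2)

def Spec_days_to_reach_top (h_ : Int) (a : Int) (b : Int) (out : Int) : Prop := out = days_to_reach_top_alt h_ a b
instance (h_ : Int) (a : Int) (b : Int) (out : Int) : Decidable (Spec_days_to_reach_top h_ a b out) := by unfold Spec_days_to_reach_top; infer_instance

-- ===== CLAIM (what is proved, stated in full; the proofs are below) =====
def Claim_equal_days_to_reach_top : Prop := ∀ (h_ : Int) (a : Int) (b : Int), Dom_days_to_reach_top h_ a b → Pre_days_to_reach_top h_ a b → Spec_days_to_reach_top h_ a b (days_to_reach_top h_ a b)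

-- ===== LEMMAS AND PROOFS =====

-- Closed form for A's loop on the natural domain (b < a, 0 ≤ a).
lemma daysLoopA_closed (h_ a b : Int) (hba : b < a) (ha : 0 ≤ a) (days cur : Int) :
    daysLoopA h_ a b days cur =
      days + (if h_ - cur ≤ a ∨ h_ - cur ≤ 0 then 0
              else -(PySem.Int.floordiv (a - (h_ - cur)) (a - b))) := by
  induction days, cur using daysLoopA.induct h_ a b with
  | case1 days cur hlt hge =>
    rw [daysLoopA, if_pos hlt, if_pos hge, if_pos (by omega)]; ring
  | case2 days cur hlt hge hb ih =>
    rw [daysLoopA, if_pos hlt, if_neg hge, if_pos hb, ih]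
    have hd : (0:Int) < a - b := by omega
    by_cases hx : h_ - (cur + a - b) ≤ a ∨ h_ - (cur + a - b) ≤ 0
    · rw [if_pos hx, if_neg (by omega)]
      have : PySem.Int.floordiv (a - (h_ - cur)) (a - b) = -1 := by
        rw [PySem.Int.floordiv_eq_iff_of_pos hd]
        constructor <;> omega
      rw [this]; ring
    · rw [if_neg hx, if_neg (by omega)]
      have hstep : a - (h_ - (cur + a - b)) = (a - (h_ - cur)) + 1 * (a - b) := by ring
      rw [hstep, PySem.Int.floordiv_eq_ediv_of_pos hd,
          PySem.Int.floordiv_eq_ediv_of_pos hd,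
          Int.add_mul_ediv_right _ _ (by omega : a - b ≠ 0)]
      ring
  | case3 days cur hlt hge hb =>
    exact absurd hba hb
  | case4 days cur hlt =>
    rw [daysLoopA, if_neg hlt, if_pos (by omega)]; ring

-- ===== VERDICT (by name: the statement is the Claim_ definition above) =====
theorem days_to_reach_top_spec : Claim_equal_days_to_reach_top := by
  intro h_ a b _ hpre
  unfold Spec_days_to_reach_top days_to_reach_top days_to_reach_top_alt
  by_cases h0 : h_ ≤ a ∨ h_ ≤ 0
  · rw [if_pos h0, daysLoopA]
    split_ifs <;> first | rfl | omega
  · have hnat : b < a ∧ 0 ≤ a := by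
      rcases hpre with h | h | h
      · omega
      · omega
      · exact h
    rw [if_neg h0, daysLoopA_closed h_ a b hnat.1 hnat.2 0 0]
    simp only [sub_zero, zero_add]
    rw [if_neg h0]
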